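-- pv_equiv track=rewrite | github.com/LAWTED/f1 | check_tickets.py | group_tickets_by_day
-- ===== SOURCE A (Python) =====
-- def group_tickets_by_day(tickets):
--     """Group tickets by day based on their CSS classes"""
--     day_groups = {
--         '3-days': [],
--         'friday': [],
--         'saturday': [],
--         'sunday': []
--     }
--
--     for ticket in tickets:
--         for day in ticket.get('days', []):
--             if day in day_groups:
--                 day_groups[day].append(ticket)
--
--     return day_groups
-- ===== SOURCE B (Python) =====
-- def group_tickets_by_day(tickets):
--     """Group tickets by day based on their CSS classes"""
--     return {
--         day: [t for t in tickets for d in t.get('days', []) if d == day]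
--         for day in ('3-days', 'friday', 'saturday', 'sunday')
--     }
-- ===== Notes on version B (the rewrite author's own statement) =====
-- stated objective: idiomatic
-- what changed: Replaces the single scatter pass that appends each ticket into mutable buckets with a dict comprehension over the four fixed day keys, each bucket gathered by its own scan of the tickets (key-outer, ticket-inner traversal).
import Mathlib
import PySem

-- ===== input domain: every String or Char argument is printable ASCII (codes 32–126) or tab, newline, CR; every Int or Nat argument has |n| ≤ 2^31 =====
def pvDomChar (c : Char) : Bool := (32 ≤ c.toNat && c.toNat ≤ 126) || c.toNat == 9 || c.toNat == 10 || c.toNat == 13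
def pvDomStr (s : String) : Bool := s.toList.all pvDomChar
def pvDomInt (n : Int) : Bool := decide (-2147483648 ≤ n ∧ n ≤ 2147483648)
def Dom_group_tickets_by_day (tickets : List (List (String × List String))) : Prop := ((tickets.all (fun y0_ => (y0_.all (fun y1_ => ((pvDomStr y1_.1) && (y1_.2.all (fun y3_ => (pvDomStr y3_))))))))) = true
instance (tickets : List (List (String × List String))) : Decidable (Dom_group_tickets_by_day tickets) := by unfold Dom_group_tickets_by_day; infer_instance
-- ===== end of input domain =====

-- B rebuilds the same four day buckets as a comprehension over the fixed keys (key-outer, ticket-inner scan)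
-- instead of A's single scatter pass into mutable buckets; objective: more idiomatic, same exact result.


-- ===== PORT A =====
def group_tickets_by_day (tickets : List (List (String × List String))) : List (String × List (List (String × List String))) :=
  let day_groups : PySem.Dict String (List (List (String × List String))) :=
    ((((PySem.Dict.empty.insert "3-days" []).insert "friday" []).insert "saturday" []).insert "sunday" [])
  let day_groups := tickets.foldl (fun dg ticket =>
    ((PySem.Dict.mk ticket).getD "days" []).foldl (fun dg day =>
      if dg.contains day then dg.modify day [] (· ++ [ticket]) else dg) dg) day_groups
  day_groups.items

-- ===== PORT B =====
def gtbd_bucket (tickets : List (List (String × List String))) (day : String) : List (List (String × List String)) :=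
  tickets.flatMap (fun t =>
    (((PySem.Dict.mk t).getD "days" []).filter (fun d => d == day)).map (fun _ => t))

def group_tickets_by_day_alt (tickets : List (List (String × List String))) : List (String × List (List (String × List String))) :=
  ["3-days", "friday", "saturday", "sunday"].map (fun day => (day, gtbd_bucket tickets day))

-- ===== PRECONDITION & SPEC =====
def Spec_group_tickets_by_day (tickets : List (List (String × List String))) (out : List (String × List (List (String × List String)))) : Prop := out = group_tickets_by_day_alt tickets
instance (tickets : List (List (String × List String))) (out : List (String × List (List (String × List String)))) : Decidable (Spec_group_tickets_by_day tickets out) := by unfold Spec_group_tickets_by_day; infer_instance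

-- ===== CLAIM (what is proved, stated in full; the proofs are below) =====
def Claim_equal_group_tickets_by_day : Prop := ∀ (tickets : List (List (String × List String))), Dom_group_tickets_by_day tickets → Spec_group_tickets_by_day tickets (group_tickets_by_day tickets)

-- ===== LEMMAS AND PROOFS =====

-- the canonical shape of A's dict throughout the loop: the four fixed keys with their buckets
def gtbd_mk4 (a b c e : List (List (String × List String))) : PySem.Dict String (List (List (String × List String))) :=
  PySem.Dict.mk [("3-days", a), ("friday", b), ("saturday", c), ("sunday", e)]

lemma gtbd_step (t : List (String × List String)) (day : String) (a b c e : List (List (String × List String))) :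
    (if (gtbd_mk4 a b c e).contains day then (gtbd_mk4 a b c e).modify day [] (· ++ [t]) else gtbd_mk4 a b c e)
    = if day = "3-days" then gtbd_mk4 (a ++ [t]) b c e
      else if day = "friday" then gtbd_mk4 a (b ++ [t]) c e
      else if day = "saturday" then gtbd_mk4 a b (c ++ [t]) e
      else if day = "sunday" then gtbd_mk4 a b c (e ++ [t])
      else gtbd_mk4 a b c e := by
  by_cases h1 : day = "3-days"
  · subst h1; simp [gtbd_mk4, PySem.Dict.contains, PySem.Dict.modify, PySem.Dict.getD,
      PySem.Dict.get?, PySem.Dict.insert]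
  · by_cases h2 : day = "friday"
    · subst h2; simp [gtbd_mk4, PySem.Dict.contains, PySem.Dict.modify, PySem.Dict.getD,
        PySem.Dict.get?, PySem.Dict.insert]
    · by_cases h3 : day = "saturday"
      · subst h3; simp [gtbd_mk4, PySem.Dict.contains, PySem.Dict.modify, PySem.Dict.getD,
          PySem.Dict.get?, PySem.Dict.insert]
      · by_cases h4 : day = "sunday"
        · subst h4; simp [gtbd_mk4, PySem.Dict.contains, PySem.Dict.modify, PySem.Dict.getD,
            PySem.Dict.get?, PySem.Dict.insert]
        · have hc : (gtbd_mk4 a b c e).contains day = false := by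
            simp [gtbd_mk4, PySem.Dict.contains]
            exact ⟨fun h => h1 h.symm, fun h => h2 h.symm, fun h => h3 h.symm, fun h => h4 h.symm⟩
          simp [hc, h1, h2, h3, h4]

lemma gtbd_inner (t : List (String × List String)) (ds : List String)
    (a b c e : List (List (String × List String))) :
    ds.foldl (fun dg day => if dg.contains day then dg.modify day [] (· ++ [t]) else dg) (gtbd_mk4 a b c e)
    = gtbd_mk4 (a ++ (ds.filter (· == "3-days")).map (fun _ => t))
               (b ++ (ds.filter (· == "friday")).map (fun _ => t))
               (c ++ (ds.filter (· == "saturday")).map (fun _ => t))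
               (e ++ (ds.filter (· == "sunday")).map (fun _ => t)) := by
  induction ds generalizing a b c e with
  | nil => simp
  | cons d ds ih =>
    simp only [List.foldl_cons]
    rw [gtbd_step]
    by_cases h1 : d = "3-days"
    · subst h1; rw [if_pos rfl, ih]; simp
    · rw [if_neg h1]
      by_cases h2 : d = "friday"
      · subst h2; rw [if_pos rfl, ih]; simp
      · rw [if_neg h2]
        by_cases h3 : d = "saturday"
        · subst h3; rw [if_pos rfl, ih]; simp
        · rw [if_neg h3]
          by_cases h4 : d = "sunday"
          · subst h4; rw [if_pos rfl, ih]; simp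
          · rw [if_neg h4, ih]
            simp [h1, h2, h3, h4]

lemma gtbd_outer (ts : List (List (String × List String)))
    (a b c e : List (List (String × List String))) :
    ts.foldl (fun dg ticket =>
        ((PySem.Dict.mk ticket).getD "days" []).foldl (fun dg day =>
          if dg.contains day then dg.modify day [] (· ++ [ticket]) else dg) dg) (gtbd_mk4 a b c e)
    = gtbd_mk4 (a ++ gtbd_bucket ts "3-days") (b ++ gtbd_bucket ts "friday")
               (c ++ gtbd_bucket ts "saturday") (e ++ gtbd_bucket ts "sunday") := by
  induction ts generalizing a b c e with
  | nil => simp [gtbd_bucket]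
  | cons t ts ih =>
    simp only [List.foldl_cons]
    rw [gtbd_inner, ih]
    simp [gtbd_bucket, List.append_assoc]

-- ===== VERDICT (by name: the statement is the Claim_ definition above) =====
theorem group_tickets_by_day_spec : Claim_equal_group_tickets_by_day := by
  intro tickets _
  unfold Spec_group_tickets_by_day group_tickets_by_day
  have h0 : ((((PySem.Dict.empty.insert "3-days" []).insert "friday" []).insert "saturday" []).insert "sunday" []
      : PySem.Dict String (List (List (String × List String)))) = gtbd_mk4 [] [] [] [] := by decide
  simp only [h0, gtbd_outer]
  simp [gtbd_mk4, group_tickets_by_day_alt]
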